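-- pv_equiv track=rewrite | github.com/leejaeyeong/Algorithm | Programmers/Summer,Winter Coding/멀쩡한사각형.py | solution
-- ===== SOURCE A (Python) =====
-- def solution(w,h):
--     min_val,max_val = min(w,h), max(w,h)
--     gcd = 0
--     #최대 공약수 구하기
--     for i in range(min_val,0,-1) :
--         if max_val % i == 0 and min_val % i == 0 :
--            gcd = i
--            break
--
--     # 전체 사각형에서 잘린 사격형을 빼줌
--     block = w*h
--     wholeHeigt = h
--     w = w // gcd
--     h = h // gcd
--     for i in range(0,wholeHeigt,h) :
--         block += -w-h+1
--
--     return block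
-- ===== SOURCE B (Python) =====
-- def solution(w, h):
--     # Euclidean gcd + closed form: w*h - w - h + gcd(w, h)
--     a, b = w, h
--     while b:
--         a, b = b, a % b
--     return w * h - w - h + a
-- ===== Notes on version B (the rewrite author's own statement) =====
-- stated objective: faster
-- what changed: B replaces A's downward trial-division gcd search and its per-block subtraction loop with the Euclidean algorithm and the closed-form w*h - w - h + gcd(w,h).
import Mathlib
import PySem

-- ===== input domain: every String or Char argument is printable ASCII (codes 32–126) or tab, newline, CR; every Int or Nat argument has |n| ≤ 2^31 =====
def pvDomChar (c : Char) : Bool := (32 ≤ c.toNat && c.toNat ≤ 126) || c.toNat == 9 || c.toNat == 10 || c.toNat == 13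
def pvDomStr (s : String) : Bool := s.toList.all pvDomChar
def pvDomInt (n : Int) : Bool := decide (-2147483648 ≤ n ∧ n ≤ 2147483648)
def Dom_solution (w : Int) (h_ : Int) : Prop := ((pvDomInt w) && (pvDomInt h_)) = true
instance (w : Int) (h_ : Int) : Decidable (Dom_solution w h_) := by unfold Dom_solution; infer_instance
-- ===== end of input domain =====

-- B replaces A's downward trial-division gcd search and per-block subtraction loop by the
-- Euclidean algorithm plus the closed form w*h - w - h + gcd(w,h) (objective: faster).

-- ===== PORT A =====
-- A's first loop: scan range(min_val, 0, -1), break at the first common divisor, else gcd = 0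
def pvFindGcd (maxv minv : Int) : List Int → Int
  | [] => 0
  | i :: rest =>
    if PySem.Int.mod maxv i = 0 ∧ PySem.Int.mod minv i = 0 then i
    else pvFindGcd maxv minv rest

def solution (w : Int) (h_ : Int) : Int :=
  let min_val := min w h_
  let max_val := max w h_
  let gcd := pvFindGcd max_val min_val (PySem.List.pyRange min_val 0 (-1))
  let block := w * h_
  let wholeHeigt := h_
  let w2 := PySem.Int.floordiv w gcd
  let h2 := PySem.Int.floordiv h_ gcd
  (PySem.List.pyRange 0 wholeHeigt h2).foldl (fun b _ => b + (-w2 - h2 + 1)) block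

-- ===== PORT B =====
-- termination measure of the Euclidean loop (stated here because the port cites it)
theorem pvMod_natAbs_lt (a b : Int) (hb : b ≠ 0) :
    (PySem.Int.mod a b).natAbs < b.natAbs := by
  rcases lt_or_gt_of_ne hb with hneg | hpos
  · have h1 := PySem.Int.mod_neg_bounds a hneg
    omega
  · have h1 := PySem.Int.mod_nonneg a hpos
    have h2 := PySem.Int.mod_lt a hpos
    omega

-- Source B: while b: a, b = b, a % b
def pvEuclid (a b : Int) : Int :=
  if _hb : b = 0 then a
  else pvEuclid b (PySem.Int.mod a b)
termination_by b.natAbs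
decreasing_by exact pvMod_natAbs_lt a b _hb

def solution_alt (w : Int) (h_ : Int) : Int :=
  w * h_ - w - h_ + pvEuclid w h_

-- ===== PRECONDITION & SPEC =====
-- A raises ZeroDivisionError whenever w ≤ 0 or h ≤ 0 (its gcd search finds no divisor and
-- leaves gcd = 0); Pre_ admits exactly the inputs on which A returns.
def Pre_solution (w : Int) (h_ : Int) : Prop := 1 ≤ w ∧ 1 ≤ h_
instance (w : Int) (h_ : Int) : Decidable (Pre_solution w h_) := by unfold Pre_solution; infer_instance
def pvWitness_solution : Int × Int := (8, 12)

def Spec_solution (w : Int) (h_ : Int) (out : Int) : Prop := out = solution_alt w h_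
instance (w : Int) (h_ : Int) (out : Int) : Decidable (Spec_solution w h_ out) := by unfold Spec_solution; infer_instance

-- ===== CLAIM (what is proved, stated in full; the proofs are below) =====
def Claim_equal_solution : Prop := ∀ (w : Int) (h_ : Int), Dom_solution w h_ → Pre_solution w h_ → Spec_solution w h_ (solution w h_)

-- ===== LEMMAS AND PROOFS =====

theorem pv_gcd_emod_step (a b : Int) : Int.gcd b (a % b) = Int.gcd a b := by
  rw [Int.emod_def, mul_comm, Int.gcd_comm a b]
  exact Int.gcd_sub_mul_right_right b a (a / b)

theorem pvEuclid_eq_gcd (a b : Int) (ha : 0 ≤ a) (hb : 0 ≤ b) :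
    pvEuclid a b = (Int.gcd a b : Int) := by
  by_cases h0 : b = 0
  · subst h0
    rw [pvEuclid]
    simp [Int.gcd, Int.natAbs_of_nonneg ha]
  · have hbpos : 0 < b := lt_of_le_of_ne hb (Ne.symm h0)
    rw [pvEuclid]
    simp only [h0, dite_false]
    rw [PySem.Int.mod_eq_emod_of_pos hbpos]
    rw [pvEuclid_eq_gcd b (a % b) hb (Int.emod_nonneg a h0)]
    rw [pv_gcd_emod_step]
termination_by b.natAbs
decreasing_by
  rw [← PySem.Int.mod_eq_emod_of_pos hbpos]
  exact pvMod_natAbs_lt a b h0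

-- the countdown scan from m finds the gcd whenever gcd ≤ m
theorem pvFindGcd_eq_gcd (maxv minv m : Int)
    (hg1 : 1 ≤ (Int.gcd maxv minv : Int)) (hg : (Int.gcd maxv minv : Int) ≤ m) :
    pvFindGcd maxv minv (PySem.List.pyRange m 0 (-1)) = (Int.gcd maxv minv : Int) := by
  have hm : (0:Int) < m := by omega
  rw [PySem.List.pyRange_neg_one_cons hm]
  rw [pvFindGcd]
  by_cases hdvd : PySem.Int.mod maxv m = 0 ∧ PySem.Int.mod minv m = 0
  · rw [if_pos hdvd]
    have h1 : m ∣ maxv := (PySem.Int.mod_eq_zero_iff_dvd _ _).1 hdvd.1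
    have h2 : m ∣ minv := (PySem.Int.mod_eq_zero_iff_dvd _ _).1 hdvd.2
    have hmn : ((m.toNat : Int)) = m := Int.toNat_of_nonneg (le_of_lt hm)
    have h3 : m.toNat ∣ Int.gcd maxv minv :=
      Int.dvd_gcd (by rw [hmn]; exact h1) (by rw [hmn]; exact h2)
    have h4 : m.toNat ≤ Int.gcd maxv minv := Nat.le_of_dvd (by omega) h3
    omega
  · rw [if_neg hdvd]
    apply pvFindGcd_eq_gcd maxv minv (m - 1) hg1
    have : (Int.gcd maxv minv : Int) ≠ m := by
      intro he
      exact hdvd ⟨by rw [PySem.Int.mod_eq_zero_iff_dvd, ← he]; exact Int.gcd_dvd_left maxv minv,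
                  by rw [PySem.Int.mod_eq_zero_iff_dvd, ← he]; exact Int.gcd_dvd_right maxv minv⟩
    omega
termination_by m.toNat
decreasing_by omega

theorem pvFoldl_const (l : List Int) (c init : Int) :
    l.foldl (fun b _ => b + c) init = init + l.length * c := by
  induction l generalizing init with
  | nil => simp
  | cons x xs ih => simp only [List.foldl, ih, List.length_cons]; push_cast; ring

theorem pv_main_eq (w h_ : Int) (hw : 1 ≤ w) (hh : 1 ≤ h_) :
    solution w h_ = solution_alt w h_ := by
  unfold solution solution_alt
  simp only []
  set G : Int := (Int.gcd w h_ : Int) with hGdef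
  have hdw : G ∣ w := Int.gcd_dvd_left w h_
  have hdh : G ∣ h_ := Int.gcd_dvd_right w h_
  have hG1 : 1 ≤ G := by
    have : (0:Int) < G := by
      rw [hGdef]
      exact_mod_cast Int.gcd_pos_of_ne_zero_left h_ (by omega)
    omega
  -- the gcd search finds G
  have hmm : Int.gcd (max w h_) (min w h_) = Int.gcd w h_ := by
    rcases le_total w h_ with hc | hc
    · rw [max_eq_right hc, min_eq_left hc, Int.gcd_comm]
    · rw [max_eq_left hc, min_eq_right hc]
  have hfind : pvFindGcd (max w h_) (min w h_) (PySem.List.pyRange (min w h_) 0 (-1)) = G := by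
    have hle : G ≤ min w h_ := by
      rcases le_total w h_ with hc | hc
      · rw [min_eq_left hc]; exact Int.le_of_dvd (by omega) hdw
      · rw [min_eq_right hc]; exact Int.le_of_dvd (by omega) hdh
    rw [pvFindGcd_eq_gcd (max w h_) (min w h_) (min w h_) (by rw [hmm]; exact hG1)
        (by rw [hmm]; exact hle), hmm]
  rw [hfind]
  -- floor divisions by the positive gcd
  have hGpos : (0:Int) < G := by omega
  rw [PySem.Int.floordiv_eq_ediv_of_pos hGpos, PySem.Int.floordiv_eq_ediv_of_pos hGpos]
  have hwG : w / G * G = w := Int.ediv_mul_cancel hdw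
  have hhG : h_ / G * G = h_ := Int.ediv_mul_cancel hdh
  have hh2pos : (0:Int) < h_ / G := by
    by_contra h
    push Not at h
    nlinarith
  -- the second loop runs G times
  have hlen : ((PySem.List.pyRange 0 h_ (h_ / G)).length : Int) = G := by
    rw [PySem.List.pyRange_of_pos 0 h_ hh2pos]
    rw [List.length_map, List.length_range]
    rw [if_pos (by omega : (0:Int) < h_)]
    have hdivval : (h_ - 0 + h_ / G - 1) / (h_ / G) = G := by
      have h1 : h_ - 0 + h_ / G - 1 = (h_ / G - 1) + G * (h_ / G) := by
        rw [mul_comm, hhG]; ring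
      rw [h1, Int.add_mul_ediv_right _ _ (by omega : h_ / G ≠ 0)]
      rw [Int.ediv_eq_zero_of_lt (by omega) (by omega)]
      omega
    rw [hdivval]
    exact Int.toNat_of_nonneg (by omega)
  rw [pvFoldl_const, hlen]
  rw [pvEuclid_eq_gcd w h_ (by omega) (by omega), ← hGdef]
  nlinarith [hwG, hhG]

-- ===== VERDICT (by name: the statement is the Claim_ definition above) =====
theorem solution_spec : Claim_equal_solution := by
  intro w h_ _ hpre
  exact pv_main_eq w h_ hpre.1 hpre.2
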